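-- pv_equiv track=rewrite | github.com/wojpo/AOC-2015 | Day-8/Script2.py | calc_difference
-- ===== SOURCE A (Python) =====
-- def calc_difference(s):
--     raw = len(s)
--     encoded = 2
--     i = 0
--     while i < len(s):
--         if s[i] == '"':
--             encoded += 2
--             i += 1
--         elif s[i] == '\\':
--             encoded += 2
--             i += 1
--         else:
--             encoded += 1
--             i += 1
--     return encoded - raw
-- ===== SOURCE B (Python) =====
-- def calc_difference(s):
--     # Actually build the encoded string literal and measure it, instead of
--     # counting per character: escape backslashes, then quotes, add the two
--     # surrounding quotes, and subtract the raw length.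
--     encoded = '"' + s.replace('\\', '\\\\').replace('"', '\\"') + '"'
--     return len(encoded) - len(s)
-- ===== Notes on version B (the rewrite author's own statement) =====
-- stated objective: faster
-- what changed: Instead of scanning the string with an index loop and a branch-driven counter, B constructs the actual encoded string literal (escape backslashes, then quotes, wrap in quotes) and returns its length minus the raw length.
import Mathlib
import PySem

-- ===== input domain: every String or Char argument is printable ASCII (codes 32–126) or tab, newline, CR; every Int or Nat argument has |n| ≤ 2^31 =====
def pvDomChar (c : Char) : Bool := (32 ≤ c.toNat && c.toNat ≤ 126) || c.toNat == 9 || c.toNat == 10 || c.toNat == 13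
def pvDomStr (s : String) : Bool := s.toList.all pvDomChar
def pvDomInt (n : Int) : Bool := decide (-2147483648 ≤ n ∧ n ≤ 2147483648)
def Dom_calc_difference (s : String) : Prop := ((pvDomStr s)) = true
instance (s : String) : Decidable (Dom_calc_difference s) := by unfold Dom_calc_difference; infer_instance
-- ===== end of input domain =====

-- B replaces A's index loop with per-character counting by a different algorithm:
-- it actually builds the encoded string literal (escape '\' then '"', wrap in
-- quotes) and returns its length minus the raw length. Same O(n); measurably
-- faster in Python (bulk str.replace instead of an interpreted per-char loop).

-- ===== PORT A =====
-- A's while loop over indices, as structural recursion over the remaining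
-- characters, carrying the 'encoded' accumulator
def calcDiffLoopA : List Char → Int → Int
  | [], encoded => encoded
  | c :: rest, encoded =>
    if c = '"' then calcDiffLoopA rest (encoded + 2)
    else if c = '\\' then calcDiffLoopA rest (encoded + 2)
    else calcDiffLoopA rest (encoded + 1)

def calc_difference (s : String) : Int :=
  let raw := PySem.Str.len s
  let encoded := calcDiffLoopA s.toList 2
  encoded - raw

-- ===== PORT B =====
def calc_difference_alt (s : String) : Int :=
  let encoded :=
    "\"" ++ PySem.Str.replace (PySem.Str.replace s "\\" "\\\\") "\"" "\\\"" ++ "\""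
  (PySem.Str.len encoded : Int) - (PySem.Str.len s : Int)

-- ===== PRECONDITION & SPEC =====
def Spec_calc_difference (s : String) (out : Int) : Prop := out = calc_difference_alt s
instance (s : String) (out : Int) : Decidable (Spec_calc_difference s out) := by unfold Spec_calc_difference; infer_instance

-- ===== CLAIM =====
def Claim_equal_calc_difference : Prop := ∀ (s : String), Dom_calc_difference s → Spec_calc_difference s (calc_difference s)

-- ===== LEMMAS AND PROOFS =====

-- A's loop: the accumulator grows by length + one extra per '"' and per '\'
theorem calcDiffLoopA_eq (l : List Char) :
    ∀ (e : Int), calcDiffLoopA l e =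
      e + l.length + (l.count '"' : Int) + (l.count '\\' : Int) := by
  induction l with
  | nil => intro e; simp [calcDiffLoopA]
  | cons h t ih =>
    intro e
    by_cases h1 : h = '"'
    · subst h1; simp [calcDiffLoopA, ih]; ring
    · by_cases h2 : h = '\\'
      · subst h2; simp [calcDiffLoopA, ih]; ring
      · simp [calcDiffLoopA, h1, h2, ih]; ring

-- Chars.replace with a single-character needle is flatMap of a pointwise substitution
theorem replace_go_singleton (c : Char) (new : List Char) (l : List Char) :
    ∀ (fuel : Nat) (acc : List Char), l.length ≤ fuel →
      PySem.Chars.replace.go [c] new fuel l acc =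
        acc.reverse ++ l.flatMap (fun x => if x = c then new else [x]) := by
  induction l with
  | nil =>
    intro fuel acc _
    cases fuel <;> simp [PySem.Chars.replace.go]
  | cons h t ih =>
    intro fuel acc hf
    cases fuel with
    | zero => simp at hf
    | succ n =>
      have ht : t.length ≤ n := by simpa using hf
      by_cases hc : h = c
      · subst hc
        simp [PySem.Chars.replace.go, List.isPrefixOf, ih n (new.reverse ++ acc) ht]
      · have hp : ([c].isPrefixOf (h :: t)) = false := by
          simp [List.isPrefixOf]; exact fun e => hc e.symm
        simp [PySem.Chars.replace.go, hp, ih n (h :: acc) ht, hc]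

theorem replace_singleton (l : List Char) (c : Char) (new : List Char) :
    PySem.Chars.replace l [c] new =
      l.flatMap (fun x => if x = c then new else [x]) := by
  simp [PySem.Chars.replace]
  simpa using replace_go_singleton c new l l.length [] le_rfl

-- length of the substitution: each c becomes two characters, others stay one
theorem length_subst_two (l : List Char) (c : Char) (a b : Char) :
    (l.flatMap (fun x => if x = c then [a, b] else [x])).length =
      l.length + l.count c := by
  induction l with
  | nil => simp
  | cons h t ih =>
    by_cases hc : h = c
    · subst hc; simp [ih]; omega
    · simp [hc, ih]; omega

-- a character d distinct from c and absent from the replacement keeps its count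
theorem count_subst_other (l : List Char) (c d : Char) (new : List Char)
    (hdc : d ≠ c) (hdn : new.count d = 0) :
    (l.flatMap (fun x => if x = c then new else [x])).count d = l.count d := by
  induction l with
  | nil => simp
  | cons h t ih =>
    by_cases hc : h = c
    · subst hc
      simp [List.count_append, ih, hdn, List.count_cons]
      exact fun e => hdc e.symm
    · simp [hc, ih, List.count_cons]

-- ===== VERDICT =====
theorem calc_difference_spec : Claim_equal_calc_difference := by
  intro s _
  show calc_difference s = calc_difference_alt s
  unfold calc_difference calc_difference_alt
  simp only [PySem.Str.len_eq, PySem.Str.toList_replace, String.toList_append,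
    calcDiffLoopA_eq]
  have h1 : PySem.Chars.replace s.toList "\\".toList "\\\\".toList =
      s.toList.flatMap (fun x => if x = '\\' then ['\\', '\\'] else [x]) := by
    simpa using replace_singleton s.toList '\\' ['\\', '\\']
  have h2 : ∀ (l : List Char), PySem.Chars.replace l "\"".toList "\\\"".toList =
      l.flatMap (fun x => if x = '"' then ['\\', '"'] else [x]) := by
    intro l; simpa using replace_singleton l '"' ['\\', '"']
  rw [h2, h1, List.length_append, List.length_append,
    length_subst_two, length_subst_two,
    count_subst_other s.toList '\\' '"' ['\\', '\\'] (by decide) (by decide)]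
  have hq : ("\"".toList).length = 1 := by decide
  rw [hq]
  push_cast
  ring
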